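-- pv_equiv track=rewrite | github.com/tofuadmiral/leetcodermans | coin_change.py | getAutocompleteScores
-- ===== SOURCE A (Python) =====
-- def getAutocompleteScores(documentTitles, documentBodies, queries):
--     # Write your code here
--     '''
--     have to find the highest score it can autocomplete to
--     step 1: figure out what it can complete to
--     step 2: figure out the scores of each
--     step 3: return the highest score
--     '''
--     # our return array
--     scores = []
--
--     # read all words into a dictionary with key = word, value = [n,m]
--     # n = title ocurrences, m = body occurrences
--     words = createWordDictionary(documentTitles, documentBodies)
--
--     # now that we have ocurrences, get scores for every word we've seen
--     wordScores = assignScores(words)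
--
--
--     # calculate scores for every query
--     for query in queries:
--         possibleWords = findPossibleWords(query, wordScores)
--         highestScore = 0 # if no possible words, will still add 0 to scores array
--         for word in possibleWords:
--             tempScore = wordScores[word]
--             if tempScore > highestScore:
--                 highestScore = tempScore
--         scores.append(highestScore)
--     return scores
--
-- def findPossibleWords(start, words):
--     # given the start of the word, find out
--     # what it can complete to
--     possibleWords = []
--
--     # go thru every word and see if can complete
--     for word in words.keys():
--         if canComplete(start, word):
--             possibleWords.append(word)
--
--     return possibleWords
--
-- def createWordDictionary(documentTitles, documentBodies):
--     # given a word, get the total score across the input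
--     # returns zero if word not in the documents
--     words = {}
--     for title in documentTitles:
--         titleWords = title.split()
--         for word in titleWords:
--             if word not in words:
--                 words[word] = [1, 0]
--             else:
--                 words[word][0] += 1
--
--     for body in documentBodies:
--         bodyWords = body.split()
--         for word in bodyWords:
--             if word not in words:
--                 words[word] = [0, 1]
--             else:
--                 words[word][1] += 1
--
--     return words
--
-- def assignScores(words):
--     wordsScores = {}
--     for key, value in words.items():
--         score = int(value[0]*10 + value[1]*1)
--         wordsScores[key] = score
--
--     return wordsScores
--
-- def canComplete(target, word):
--     if target > word:
--         return False
--
--     for i in range(len(target)):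
--         if target[i] != word[i]:
--             return False
--
--     # if we've made it this far, every char in target
--     # was in word so it can complete
--     return True
-- ===== SOURCE B (Python) =====
-- def getAutocompleteScores(documentTitles, documentBodies, queries):
--     # One pass builds word scores; a prefix->max-score map replaces the per-query
--     # scan over all words, so each query is a single dictionary lookup.
--     score = {}
--     for title in documentTitles:
--         for w in title.split():
--             score[w] = score.get(w, 0) + 10
--     for body in documentBodies:
--         for w in body.split():
--             score[w] = score.get(w, 0) + 1
--     best = {}
--     for w, s in score.items():
--         for i in range(len(w) + 1):
--             p = w[:i]
--             if best.get(p, 0) < s: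
--                 best[p] = s
--     return [best.get(q, 0) for q in queries]
-- ===== Notes on version B (the rewrite author's own statement) =====
-- stated objective: faster
-- what changed: A scans every dictionary word per query (lexicographic test plus char-by-char prefix scan) over three separately built dicts; B folds the counting into one score dict and precomputes a prefix-to-max-score dictionary once, so each query is a single dictionary lookup.
import Mathlib
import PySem

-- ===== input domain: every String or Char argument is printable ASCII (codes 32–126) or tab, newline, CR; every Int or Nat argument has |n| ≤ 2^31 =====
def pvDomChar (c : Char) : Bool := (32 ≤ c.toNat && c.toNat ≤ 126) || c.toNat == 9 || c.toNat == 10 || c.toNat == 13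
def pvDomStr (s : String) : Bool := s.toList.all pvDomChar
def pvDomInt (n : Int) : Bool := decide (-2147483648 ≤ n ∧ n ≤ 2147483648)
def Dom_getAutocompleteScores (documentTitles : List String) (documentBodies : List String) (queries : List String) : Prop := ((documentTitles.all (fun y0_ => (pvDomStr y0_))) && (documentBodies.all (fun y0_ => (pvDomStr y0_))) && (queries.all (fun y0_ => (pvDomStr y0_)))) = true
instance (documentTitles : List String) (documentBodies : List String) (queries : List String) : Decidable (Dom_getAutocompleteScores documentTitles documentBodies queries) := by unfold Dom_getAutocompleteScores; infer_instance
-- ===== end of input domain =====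

-- B replaces A's per-query scan over every dictionary word by a prefix→max-score
-- dictionary built once, so each query becomes a single lookup (objective: faster).

-- ===== PORT A =====
-- 'for i in range(len(target)): if target[i] != word[i]: return False' is ported as .all over the
-- same range comparing the pyGet? Options: whenever Python reaches the comparison both indices are
-- the in-range chars, and after a first mismatch the Python has already returned False, as does .all.
def pvCanComplete (target word : String) : Bool :=
  if word < target then false
  else (PySem.List.pyRange 0 (PySem.Str.len target) 1).all
    (fun i => PySem.Str.pyGet? target i == PySem.Str.pyGet? word i)

def pvFindPossibleWords (start : String) (words : PySem.Dict String Int) : List String :=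
  words.keys.foldl (fun possibleWords word =>
    if pvCanComplete start word then possibleWords ++ [word] else possibleWords) []

def pvCreateWordDictionary (documentTitles documentBodies : List String) : PySem.Dict String (Int × Int) :=
  let words := documentTitles.foldl (fun words title =>
    (PySem.Str.split₀ title).foldl (fun words word =>
      if words.contains word = false then words.insert word (1, 0)
      else words.modify word (0, 0) (fun v => (v.1 + 1, v.2))) words) PySem.Dict.empty
  documentBodies.foldl (fun words body =>
    (PySem.Str.split₀ body).foldl (fun words word =>
      if words.contains word = false then words.insert word (0, 1)
      else words.modify word (0, 0) (fun v => (v.1, v.2 + 1))) words) words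

def pvAssignScores (words : PySem.Dict String (Int × Int)) : PySem.Dict String Int :=
  words.items.foldl (fun wordsScores kv => wordsScores.insert kv.1 (kv.2.1 * 10 + kv.2.2 * 1))
    PySem.Dict.empty

def getAutocompleteScores (documentTitles : List String) (documentBodies : List String) (queries : List String) : List Int :=
  let words := pvCreateWordDictionary documentTitles documentBodies
  let wordScores := pvAssignScores words
  queries.foldl (fun scores query =>
    let possibleWords := pvFindPossibleWords query wordScores
    let highestScore := possibleWords.foldl (fun highestScore word =>
      -- wordScores[word]: the key comes from wordScores.keys, so it is present and getD is exact
      let tempScore := wordScores.getD word 0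
      if highestScore < tempScore then tempScore else highestScore) 0
    scores ++ [highestScore]) []

-- ===== PORT B =====
def getAutocompleteScores_alt (documentTitles : List String) (documentBodies : List String) (queries : List String) : List Int :=
  let score0 := documentTitles.foldl (fun d title =>
    (PySem.Str.split₀ title).foldl (fun d w => d.insert w (d.getD w 0 + 10)) d) PySem.Dict.empty
  let score := documentBodies.foldl (fun d body =>
    (PySem.Str.split₀ body).foldl (fun d w => d.insert w (d.getD w 0 + 1)) d) score0
  let best := score.items.foldl (fun best ws =>
    (PySem.List.pyRange 0 (PySem.Str.len ws.1 + 1) 1).foldl (fun best i =>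
      let p := PySem.Str.slice ws.1 none (some i)
      if best.getD p 0 < ws.2 then best.insert p ws.2 else best) best) PySem.Dict.empty
  queries.map (fun q => best.getD q 0)

-- ===== PRECONDITION & SPEC =====
def Spec_getAutocompleteScores (documentTitles : List String) (documentBodies : List String) (queries : List String) (out : List Int) : Prop := out = getAutocompleteScores_alt documentTitles documentBodies queries
instance (documentTitles : List String) (documentBodies : List String) (queries : List String) (out : List Int) : Decidable (Spec_getAutocompleteScores documentTitles documentBodies queries out) := by unfold Spec_getAutocompleteScores; infer_instance

-- ===== CLAIM (what is proved, stated in full; the proofs are below) =====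
def Claim_equal_getAutocompleteScores : Prop := ∀ (documentTitles : List String) (documentBodies : List String) (queries : List String), Dom_getAutocompleteScores documentTitles documentBodies queries → Spec_getAutocompleteScores documentTitles documentBodies queries (getAutocompleteScores documentTitles documentBodies queries)

-- ===== LEMMAS AND PROOFS =====

/-- value map taking A's occurrence pair to its score -/
def pvF (p : String × (Int × Int)) : String × Int := (p.1, p.2.1 * 10 + p.2.2 * 1)

/-- a fold over the same list preserves a relation preserved by each step -/
theorem pv_foldl_rel {α β γ : Type} (P : β → γ → Prop) (fA : β → α → β) (fB : γ → α → γ)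
    (h : ∀ x b c, P b c → P (fA b x) (fB c x)) :
    ∀ (l : List α) (b : β) (c : γ), P b c → P (l.foldl fA b) (l.foldl fB c) := by
  intro l
  induction l with
  | nil => intro b c hbc; exact hbc
  | cons x t ih => intro b c hbc; exact ih _ _ (h x b c hbc)

/-- the simulation invariant between A's pair dictionary and B's score dictionary -/
def pvJ (ws : PySem.Dict String (Int × Int)) (d : PySem.Dict String Int) : Prop :=
  d.items = ws.items.map pvF ∧ ws.keys.Nodup

theorem pv_keys_eq {ws : PySem.Dict String (Int × Int)} {d : PySem.Dict String Int}
    (h : d.items = ws.items.map pvF) : d.keys = ws.keys := by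
  simp only [PySem.Dict.keys, h, List.map_map]
  rfl

theorem pv_contains_eq {ws : PySem.Dict String (Int × Int)} {d : PySem.Dict String Int}
    (h : d.items = ws.items.map pvF) (w : String) : d.contains w = ws.contains w := by
  simp only [PySem.Dict.contains, h, List.any_map]
  rfl

/-- one word step: A counts into the pair at `w` (fresh value `a`, update `g`), B adds `δ` -/
theorem pv_word_step (a : Int × Int) (g : Int × Int → Int × Int) (δ : Int)
    (ha : a.1 * 10 + a.2 * 1 = 0 + δ)
    (hg : ∀ v, (g v).1 * 10 + (g v).2 * 1 = (v.1 * 10 + v.2 * 1) + δ)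
    (w : String) (ws : PySem.Dict String (Int × Int)) (d : PySem.Dict String Int)
    (h : pvJ ws d) :
    pvJ (if ws.contains w = false then ws.insert w a else ws.modify w (0, 0) g)
      (d.insert w (d.getD w 0 + δ)) := by
  obtain ⟨hit, hnd⟩ := h
  rcases Bool.eq_false_or_eq_true (ws.contains w) with hc | hc
  swap
  · rw [if_pos hc]
    have hdc : d.contains w = false := by rw [pv_contains_eq hit, hc]
    constructor
    · rw [PySem.Dict.items_insert_of_not_contains _ _ hdc,
        PySem.Dict.items_insert_of_not_contains _ _ hc,
        PySem.Dict.getD_of_not_contains d 0 hdc, hit]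
      simp [pvF]
      omega
    · exact PySem.Dict.nodup_keys_insert ws w a hnd
  · rw [if_neg (by simp [hc])]
    have hdc : d.contains w = true := by rw [pv_contains_eq hit, hc]
    have hdnd : d.keys.Nodup := by rw [pv_keys_eq hit]; exact hnd
    constructor
    · rw [PySem.Dict.items_insert_of_contains d _ hdc, PySem.Dict.modify,
        PySem.Dict.items_insert_of_contains ws _ hc, hit, List.map_map, List.map_map]
      apply List.map_congr_left
      intro p hp
      by_cases hpw : p.1 = w
      · have hmemA : (w, p.2) ∈ ws.items := by
          have : p = (w, p.2) := by rw [← hpw]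
        
          rw [← this]; exact hp
        have hA : ws.getD w (0, 0) = p.2 :=
          PySem.Dict.getD_of_mem_items ws hmemA hnd (0, 0)
        have hmemB : (w, p.2.1 * 10 + p.2.2 * 1) ∈ d.items := by
          rw [hit]
          refine List.mem_map.mpr ⟨p, hp, ?_⟩
          rw [pvF, hpw]
        have hB : d.getD w 0 = p.2.1 * 10 + p.2.2 * 1 :=
          PySem.Dict.getD_of_mem_items d hmemB hdnd 0
        simp only [Function.comp, pvF, hpw, beq_self_eq_true, if_pos, hA, hB]
        have := hg p.2
        simp only [Prod.mk.injEq]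
        exact ⟨trivial, by omega⟩
      · simp only [Function.comp, pvF]
        rw [if_neg (by simpa using hpw), if_neg (by simpa using hpw)]
    · have : (ws.modify w (0, 0) g).keys = (ws.insert w (g (ws.getD w (0, 0)))).keys :=
        PySem.Dict.keys_modify ws w (0, 0) g
      rw [PySem.Dict.modify]
      exact PySem.Dict.nodup_keys_insert ws w _ hnd

theorem pv_phase (a : Int × Int) (g : Int × Int → Int × Int) (δ : Int)
    (ha : a.1 * 10 + a.2 * 1 = 0 + δ)
    (hg : ∀ v, (g v).1 * 10 + (g v).2 * 1 = (v.1 * 10 + v.2 * 1) + δ)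
    (docs : List String) (ws : PySem.Dict String (Int × Int)) (d : PySem.Dict String Int)
    (h : pvJ ws d) :
    pvJ (docs.foldl (fun ws doc =>
          (PySem.Str.split₀ doc).foldl (fun ws word =>
            if ws.contains word = false then ws.insert word a
            else ws.modify word (0, 0) g) ws) ws)
        (docs.foldl (fun d doc =>
          (PySem.Str.split₀ doc).foldl (fun d w => d.insert w (d.getD w 0 + δ)) d) d) := by
  refine pv_foldl_rel pvJ _ _ ?_ docs ws d h
  intro doc ws d h
  exact pv_foldl_rel pvJ _ _ (fun w ws d h => pv_word_step a g δ ha hg w ws d h)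
    (PySem.Str.split₀ doc) ws d h

/-- prefixes never exceed in Python's lexicographic string order -/
theorem pv_not_lt_of_prefix : ∀ (l l' : List Char), l <+: l' → ¬ l' < l := by
  intro l
  induction l with
  | nil => intro l' _ hlt; simp at hlt
  | cons a t ih =>
    intro l' hpre hlt
    obtain ⟨r, rfl⟩ := hpre
    rw [List.cons_append, List.cons_lt_cons_iff] at hlt
    rcases hlt with h | ⟨_, h⟩
    · exact lt_irrefl a h
    · exact ih (t ++ r) ⟨r, rfl⟩ h

/-- A's canComplete is exactly the prefix test -/
theorem pv_canComplete_eq (t w : String) :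
    pvCanComplete t w = decide (t.toList <+: w.toList) := by
  apply Bool.coe_iff_coe.mp
  rw [decide_eq_true_eq]
  unfold pvCanComplete
  constructor
  · intro h
    by_cases hlt : w < t
    · rw [if_pos hlt] at h; exact absurd h (by simp)
    · rw [if_neg hlt] at h
      rw [List.all_eq_true] at h
      have hall : ∀ k : Nat, k < t.toList.length → t.toList[k]? = w.toList[k]? := by
        intro k hk
        have hmem : (k : Int) ∈ PySem.List.pyRange 0 (PySem.Str.len t) 1 := by
          rw [PySem.List.mem_pyRange_one]
          constructor
          · exact Int.ofNat_nonneg k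
          · simp only [PySem.Str.len]; exact_mod_cast hk
        have := h _ hmem
        simpa using this
      have hle : t.toList.length ≤ w.toList.length := by
        by_contra hgt
        push_neg at hgt
        have := hall w.toList.length hgt
        rw [List.getElem?_eq_none (le_refl _), List.getElem?_eq_getElem hgt] at this
        exact absurd this (by simp)
      rw [List.prefix_iff_eq_take]
      apply List.ext_getElem?
      intro k
      rw [List.getElem?_take]
      by_cases hk : k < t.toList.length
      · rw [if_pos hk, hall k hk]
      · rw [if_neg hk, List.getElem?_eq_none (by omega)]
  · intro hpre
    have hnlt : ¬ w < t := by
      rw [String.lt_iff_toList_lt]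
      exact pv_not_lt_of_prefix _ _ hpre
    rw [if_neg hnlt, List.all_eq_true]
    intro i hi
    rw [PySem.List.mem_pyRange_one] at hi
    obtain ⟨r, hr⟩ := hpre
    have hkl : i.toNat < t.toList.length := by
      have := hi.2
      simp only [PySem.Str.len] at this
      omega
    simp only [PySem.Str.pyGet?_eq, PySem.Chars.pyGet?_eq_listPyGet?,
      PySem.List.pyGet?_of_nonneg _ hi.1]
    rw [← hr, List.getElem?_append_left hkl]
    simp

/-- iterations whose slice key is not `q` do not change the `q` entry of `best` -/
theorem pv_preserve (w : String) (s : Int) (q : String) :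
    ∀ (l : List Int) (b : PySem.Dict String Int),
    (∀ i ∈ l, PySem.Str.slice w none (some i) ≠ q) →
    (l.foldl (fun best i =>
        let p := PySem.Str.slice w none (some i)
        if best.getD p 0 < s then best.insert p s else best) b).getD q 0 = b.getD q 0 := by
  intro l
  induction l with
  | nil => intro b _; rfl
  | cons i t ih =>
    intro b hne
    rw [List.foldl_cons]
    rw [ih _ (fun j hj => hne j (List.mem_cons_of_mem i hj))]
    simp only []
    split_ifs with hlt
    · exact PySem.Dict.getD_insert_of_ne b s 0 (fun h => hne i List.mem_cons_self h.symm)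
    · rfl

theorem pv_slice_toList (w : String) (i : Int) (h : 0 ≤ i) :
    (PySem.Str.slice w none (some i)).toList = w.toList.take i.toNat := by
  simp only [PySem.Str.slice, String.toList_ofList, PySem.Chars.slice_eq_listSlice,
    PySem.List.slice_to _ h]

/-- one word of B's prefix loop updates the `q` entry exactly when `q` is a prefix of the word -/
theorem pv_inner (w : String) (s : Int) (q : String) (b : PySem.Dict String Int) :
    ((PySem.List.pyRange 0 (PySem.Str.len w + 1) 1).foldl (fun best i =>
        let p := PySem.Str.slice w none (some i)
        if best.getD p 0 < s then best.insert p s else best) b).getD q 0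
    = if q.toList <+: w.toList then (if b.getD q 0 < s then s else b.getD q 0)
      else b.getD q 0 := by
  by_cases hpre : q.toList <+: w.toList
  · rw [if_pos hpre]
    have hL : q.toList.length ≤ w.toList.length := List.IsPrefix.length_le hpre
    have hsplit : PySem.List.pyRange 0 (PySem.Str.len w + 1) 1
        = PySem.List.pyRange 0 (q.toList.length : Int) 1
          ++ PySem.List.pyRange (q.toList.length : Int) (PySem.Str.len w + 1) 1 := by
      apply PySem.List.pyRange_one_append
      · exact Int.ofNat_nonneg _
      · simp only [PySem.Str.len]; exact_mod_cast Nat.le_succ_of_le hL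
    have hcons : PySem.List.pyRange (q.toList.length : Int) (PySem.Str.len w + 1) 1
        = (q.toList.length : Int)
          :: PySem.List.pyRange ((q.toList.length : Int) + 1) (PySem.Str.len w + 1) 1 := by
      apply PySem.List.pyRange_one_cons
      simp only [PySem.Str.len]
      exact_mod_cast Nat.lt_succ_of_le hL
    rw [hsplit, List.foldl_append, hcons, List.foldl_cons]
    have hKeyq : PySem.Str.slice w none (some (q.toList.length : Int)) = q := by
      have : (PySem.Str.slice w none (some (q.toList.length : Int))).toList = q.toList := by
        rw [pv_slice_toList _ _ (Int.ofNat_nonneg _)]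
        rw [Int.toNat_natCast]
        exact (List.prefix_iff_eq_take.mp hpre).symm
      calc PySem.Str.slice w none (some (q.toList.length : Int))
          = String.ofList (PySem.Str.slice w none (some (q.toList.length : Int))).toList := by
            rw [String.ofList_toList]
        _ = q := by rw [this, String.ofList_toList]
    have hb1 : ∀ i ∈ PySem.List.pyRange 0 (q.toList.length : Int) 1,
        PySem.Str.slice w none (some i) ≠ q := by
      intro i hi heq
      rw [PySem.List.mem_pyRange_one] at hi
      have : (PySem.Str.slice w none (some i)).toList.length = i.toNat := by
        rw [pv_slice_toList _ _ hi.1, List.length_take]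
        omega
      rw [heq] at this
      omega
    have hb2 : ∀ i ∈ PySem.List.pyRange ((q.toList.length : Int) + 1) (PySem.Str.len w + 1) 1,
        PySem.Str.slice w none (some i) ≠ q := by
      intro i hi heq
      rw [PySem.List.mem_pyRange_one] at hi
      have h0 : (0 : Int) ≤ i := le_trans (by positivity) hi.1
      have : (PySem.Str.slice w none (some i)).toList.length = i.toNat := by
        rw [pv_slice_toList _ _ h0, List.length_take]
        have := hi.2
        simp only [PySem.Str.len] at this
        omega
      rw [heq] at this
      omega
    rw [pv_preserve w s q _ _ hb2]
    simp only [hKeyq]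
    have hX := pv_preserve w s q _ b hb1
    rw [hX]
    split_ifs with hlt
    · rw [PySem.Dict.getD_insert_self]
    · exact hX
  · rw [if_neg hpre]
    apply pv_preserve
    intro i hi heq
    rw [PySem.List.mem_pyRange_one] at hi
    apply hpre
    rw [← heq, pv_slice_toList _ _ hi.1]
    exact List.take_prefix _ _

/-- B's best dictionary, looked up at `q`, is the running max of prefix-matching scores -/
theorem pv_outer (q : String) :
    ∀ (S : List (String × Int)) (b : PySem.Dict String Int),
    (S.foldl (fun best ws =>
        (PySem.List.pyRange 0 (PySem.Str.len ws.1 + 1) 1).foldl (fun best i =>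
          let p := PySem.Str.slice ws.1 none (some i)
          if best.getD p 0 < ws.2 then best.insert p ws.2 else best) best) b).getD q 0
    = S.foldl (fun h ws =>
        if q.toList <+: ws.1.toList then (if h < ws.2 then ws.2 else h) else h) (b.getD q 0) := by
  intro S
  induction S with
  | nil => intro b; rfl
  | cons ws t ih =>
    intro b
    rw [List.foldl_cons, List.foldl_cons, ih, pv_inner]

/-- A's per-query scan equals the same running max over the items of the score dictionary -/
theorem pv_Aquery (q : String) (S : PySem.Dict String Int) (hnd : S.keys.Nodup) :
    (pvFindPossibleWords q S).foldl (fun highestScore word =>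
      let tempScore := S.getD word 0
      if highestScore < tempScore then tempScore else highestScore) 0
    = S.items.foldl (fun h ws =>
        if q.toList <+: ws.1.toList then (if h < ws.2 then ws.2 else h) else h) 0 := by
  unfold pvFindPossibleWords
  rw [PySem.List.foldl_append_if_eq_filter, List.nil_append]
  have hfc : S.keys.filter (fun word => pvCanComplete q word)
      = S.keys.filter (fun word => decide (q.toList <+: word.toList)) := by
    apply List.filter_congr
    intro w _
    exact pv_canComplete_eq q w
  rw [hfc, ← PySem.List.foldl_if_eq_foldl_filter]
  rw [PySem.Dict.items_eq_map_keys S hnd 0, List.foldl_map]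
  apply PySem.List.foldl_congr_mem
  intro acc w _
  simp only []
  split_ifs <;> simp_all

-- ===== VERDICT (by name: the statement is the Claim_ definition above) =====
theorem getAutocompleteScores_spec : Claim_equal_getAutocompleteScores := by
  unfold Claim_equal_getAutocompleteScores
  intro dt db qs _
  unfold Spec_getAutocompleteScores getAutocompleteScores getAutocompleteScores_alt
  simp only []
  have hJ : pvJ (pvCreateWordDictionary dt db)
      (db.foldl (fun d body =>
        (PySem.Str.split₀ body).foldl (fun d w => d.insert w (d.getD w 0 + 1)) d)
        (dt.foldl (fun d title =>
          (PySem.Str.split₀ title).foldl (fun d w => d.insert w (d.getD w 0 + 10)) d)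
          (PySem.Dict.empty : PySem.Dict String Int))) := by
    unfold pvCreateWordDictionary
    simp only []
    apply pv_phase (0, 1) (fun v => (v.1, v.2 + 1)) 1 (by norm_num) (by intro v; ring)
    apply pv_phase (1, 0) (fun v => (v.1 + 1, v.2)) 10 (by norm_num) (by intro v; ring)
    exact ⟨rfl, List.nodup_nil⟩
  set words := pvCreateWordDictionary dt db with hwords
  set score := db.foldl (fun d body =>
      (PySem.Str.split₀ body).foldl (fun d w => d.insert w (d.getD w 0 + 1)) d)
      (dt.foldl (fun d title =>
        (PySem.Str.split₀ title).foldl (fun d w => d.insert w (d.getD w 0 + 10)) d)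
        (PySem.Dict.empty : PySem.Dict String Int)) with hscore
  obtain ⟨hit, hnd⟩ := hJ
  have hW : pvAssignScores words = score := by
    apply PySem.Dict.ext
    unfold pvAssignScores
    rw [PySem.Dict.items_foldl_insert_fresh words.items (fun kv => kv.1)
      (fun kv => kv.2.1 * 10 + kv.2.2 * 1) PySem.Dict.empty
      (fun a _ => PySem.Dict.contains_empty a.1) hnd]
    rw [hit]
    rfl
  rw [hW]
  have hSnd : score.keys.Nodup := by rw [pv_keys_eq hit]; exact hnd
  rw [PySem.List.foldl_append_singleton_eq_map, List.nil_append]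
  apply List.map_congr_left
  intro q _
  rw [pv_Aquery q score hSnd, pv_outer q score.items PySem.Dict.empty,
    PySem.Dict.getD_empty]
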